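-- pv_equiv track=rewrite | github.com/GitGudBruhh/MiniProjectSARKAS | src/game_knuth/GameHelper.py | createAnswerList
-- ===== SOURCE A (Python) =====
-- import copy
--
-- def createAnswerList(noColours: int, noSlots: int):
--     finalAnswerList = []
--     for color in range(1, noColours+1):
--         finalAnswerList.append([str(color)])
--
--     for idx in range(noSlots-1):
--         tempList = []
--         for elem in finalAnswerList:
--             for color in range(1, noColours+1):
--                 newElem = copy.copy(elem)
--                 newElem.append(str(color))
--                 tempList.append(newElem)
--         finalAnswerList = tempList
--
--     return finalAnswerList
-- ===== SOURCE B (Python) =====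
-- def createAnswerList(noColours: int, noSlots: int):
--     colours = [str(c) for c in range(1, noColours + 1)]
--     result = []
--     for i in range(len(colours) ** noSlots):
--         row = []
--         for place in range(noSlots - 1, -1, -1):
--             row.append(colours[i // len(colours) ** place % len(colours)])
--         result.append(row)
--     return result
-- ===== Notes on version B (the rewrite author's own statement) =====
-- stated objective: alternative
-- what changed: Instead of repeatedly rebuilding the whole list by appending one more colour to every existing row (noSlots-1 product-extension passes with explicit copies), B computes total = len(colours)**noSlots once and decodes each index i in range(total) as a noSlots-digit base-len(colours) number read from the highest place down, emitting each row directly in the same lexicographic order; Pre_ excludes negative noSlots (outside the natural domain), where A's single-slot rows are a leftover of its empty extension loop and B's power-based enumeration raises.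
-- intended difference: For noSlots = 0 A still returns the untrimmed one-colour seed rows (e.g. [['1'],['2']]) because its extension loop never runs, while B returns [[]], the empty cartesian product, which is the intended value for zero slots. — e.g. on createAnswerList(2, 0): A returns [["1"], ["2"]], B returns [[]]
-- outside the precondition, e.g. on createAnswerList(3, -2): A returns [['1'], ['2'], ['3']], B raises TypeError
import Mathlib
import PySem

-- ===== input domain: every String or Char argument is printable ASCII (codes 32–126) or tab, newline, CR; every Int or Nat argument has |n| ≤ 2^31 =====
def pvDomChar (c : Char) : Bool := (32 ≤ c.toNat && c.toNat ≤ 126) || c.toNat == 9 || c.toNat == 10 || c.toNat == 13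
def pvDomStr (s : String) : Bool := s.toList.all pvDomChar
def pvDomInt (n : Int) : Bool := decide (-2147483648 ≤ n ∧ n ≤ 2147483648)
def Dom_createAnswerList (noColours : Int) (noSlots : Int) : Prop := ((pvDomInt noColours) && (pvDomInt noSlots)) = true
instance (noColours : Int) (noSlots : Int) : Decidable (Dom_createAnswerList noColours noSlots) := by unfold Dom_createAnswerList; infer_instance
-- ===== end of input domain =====

-- B enumerates the cartesian product by decoding each index in range(len(colours)**noSlots)
-- as a base-len(colours) number (highest place first) instead of A's generation-by-generation
-- product extension; objective: alternative decomposition, same cost. For noSlots = 0, B returns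
-- [[]] (the empty product) where A returns its untrimmed one-colour seed rows (stated as D_ below).

-- ===== PORT A =====
def createAnswerList (noColours : Int) (noSlots : Int) : List (List String) :=
  let finalAnswerList :=
    (PySem.List.pyRange 1 (noColours + 1) 1).foldl
      (fun acc color => acc ++ [[PySem.Int.toStr color]]) []
  (PySem.List.pyRange 0 (noSlots - 1) 1).foldl
    (fun fal _idx =>
      fal.foldl
        (fun tempList elem =>
          (PySem.List.pyRange 1 (noColours + 1) 1).foldl
            (fun t color => t ++ [elem ++ [PySem.Int.toStr color]]) tempList)
        [])
    finalAnswerList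

-- ===== PORT B =====
-- 'len(colours) ** noSlots' ported as '^ noSlots.toNat': exact on Pre_ (noSlots ≥ 0; Python raises
-- on a negative exponent, which Pre_ excludes). 'colours[j]' ported as pyGetD with default "":
-- for every i < total the index j satisfies 0 ≤ j < len(colours), so the default is never used.
def createAnswerList_alt (noColours : Int) (noSlots : Int) : List (List String) :=
  let colours := (PySem.List.pyRange 1 (noColours + 1) 1).map PySem.Int.toStr
  let L : Int := colours.length
  (PySem.List.pyRange 0 (L ^ noSlots.toNat) 1).foldl
    (fun result i =>
      result ++
        [(PySem.List.pyRange (noSlots - 1) (-1) (-1)).foldl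
          (fun row place =>
            row ++ [PySem.List.pyGetD colours
              (PySem.Int.mod (PySem.Int.floordiv i (L ^ place.toNat)) L) ""]) []])
    []

-- ===== PRECONDITION & SPEC =====
-- Pre_ excludes negative noSlots (outside the natural domain of a slot count), where A's
-- single-slot rows are a leftover of its empty extension loop and B's power-based enumeration raises.
def Pre_createAnswerList (noColours : Int) (noSlots : Int) : Prop := 0 ≤ noSlots
instance (noColours : Int) (noSlots : Int) : Decidable (Pre_createAnswerList noColours noSlots) := by unfold Pre_createAnswerList; infer_instance
def pvWitness_createAnswerList : Int × Int := (2, 2)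

-- For noSlots = 0 A still returns the untrimmed one-colour seed rows (e.g. [['1'],['2']]) because
-- its extension loop never runs, while B returns [[]], the empty cartesian product, which is the
-- intended value for zero slots.
def D_createAnswerList (noColours : Int) (noSlots : Int) : Prop := noSlots = 0
instance (noColours : Int) (noSlots : Int) : Decidable (D_createAnswerList noColours noSlots) := by unfold D_createAnswerList; infer_instance

def Spec_createAnswerList (noColours : Int) (noSlots : Int) (out : List (List String)) : Prop := ¬ D_createAnswerList noColours noSlots → out = createAnswerList_alt noColours noSlots
instance (noColours : Int) (noSlots : Int) (out : List (List String)) : Decidable (Spec_createAnswerList noColours noSlots out) := by unfold Spec_createAnswerList; infer_instance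

def pvDiffWitness_createAnswerList : Int × Int := (2, 0)
def pvDiffWitnessOut_createAnswerList : (List (List String)) × (List (List String)) := ([["1"], ["2"]], [[]])

-- ===== CLAIM (what is proved, stated in full; the proofs are below) =====
def Claim_unchanged_createAnswerList : Prop := ∀ (noColours : Int) (noSlots : Int), Dom_createAnswerList noColours noSlots → Pre_createAnswerList noColours noSlots → Spec_createAnswerList noColours noSlots (createAnswerList noColours noSlots)
def Claim_changed_createAnswerList : Prop := Dom_createAnswerList (pvDiffWitness_createAnswerList.1) (pvDiffWitness_createAnswerList.2) ∧ Pre_createAnswerList (pvDiffWitness_createAnswerList.1) (pvDiffWitness_createAnswerList.2) ∧ D_createAnswerList (pvDiffWitness_createAnswerList.1) (pvDiffWitness_createAnswerList.2) ∧ createAnswerList (pvDiffWitness_createAnswerList.1) (pvDiffWitness_createAnswerList.2) = pvDiffWitnessOut_createAnswerList.1 ∧ createAnswerList_alt (pvDiffWitness_createAnswerList.1) (pvDiffWitness_createAnswerList.2) = pvDiffWitnessOut_createAnswerList.2 ∧ pvDiffWitnessOut_createAnswerList.1 ≠ pvDiffWitnessOut_createAnswerList.2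
def Claim_exact_createAnswerList : Prop := ∀ (noColours : Int) (noSlots : Int), Dom_createAnswerList noColours noSlots → Pre_createAnswerList noColours noSlots → D_createAnswerList noColours noSlots → createAnswerList noColours noSlots ≠ createAnswerList_alt noColours noSlots

-- ===== LEMMAS AND PROOFS =====

-- one generation of A's product extension, in closed form
def pvStep (b : Int) (L : List (List String)) : List (List String) :=
  L.flatMap (fun e => (PySem.List.pyRange 1 (b + 1) 1).map (fun c => e ++ [PySem.Int.toStr c]))

-- low-to-high digit list of x in base b, length m (proof-side characterisation of one row)
def pvAltDigits (base : Int) : Nat → Int → List String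
  | 0, _ => []
  | k + 1, x =>
      PySem.Int.toStr (PySem.Int.mod x base + 1) :: pvAltDigits base k (PySem.Int.floordiv x base)

lemma pv_iter_fold (b : Int) (l : List Int) (L : List (List String)) :
    l.foldl (fun fal _ => pvStep b fal) L = (pvStep b)^[l.length] L := by
  induction l generalizing L with
  | nil => rfl
  | cons x xs ih => simp [List.foldl_cons, ih, Function.iterate_succ_apply]

lemma pv_A_eq_iterate (nc ns : Int) :
    createAnswerList nc ns
      = (pvStep nc)^[(ns - 1).toNat]
          ((PySem.List.pyRange 1 (nc + 1) 1).map (fun c => [PySem.Int.toStr c])) := by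
  unfold createAnswerList
  simp only [PySem.List.foldl_append_singleton_eq_map, PySem.List.foldl_append_eq_flatMap,
    List.nil_append]
  have h : (fun (fal : List (List String)) (_idx : Int) =>
      fal.flatMap (fun elem => (PySem.List.pyRange 1 (nc + 1) 1).map
        (fun color => elem ++ [PySem.Int.toStr color])))
      = fun fal _idx => pvStep nc fal := rfl
  rw [h, pv_iter_fold, PySem.List.length_pyRange_one]
  norm_num

lemma pv_range_mul_flatMap (N B : Nat) :
    List.range (N * B)
      = (List.range N).flatMap (fun q => (List.range B).map (fun r => q * B + r)) := by
  induction N with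
  | zero => simp
  | succ n ih =>
      rw [Nat.succ_mul, List.range_add, ih, List.range_succ, List.flatMap_append]
      simp

lemma pv_key (b : Int) (hb : 0 < b) (k : Nat) :
    (pvStep b)^[k] ((PySem.List.pyRange 1 (b + 1) 1).map (fun c => [PySem.Int.toStr c]))
      = (List.range (b.toNat ^ (k + 1))).map
          (fun i : Nat => (pvAltDigits b (k + 1) (i : Int)).reverse) := by
  have hcast : ((b.toNat : Int)) = b := Int.toNat_of_nonneg hb.le
  have hcolors : PySem.List.pyRange 1 (b + 1) 1
      = (List.range b.toNat).map (fun j : Nat => 1 + (j : Int)) := by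
    rw [PySem.List.pyRange_one, add_sub_cancel_right]
  induction k with
  | zero =>
      simp only [Function.iterate_zero, id, Nat.zero_add, pow_one, hcolors, List.map_map]
      refine List.map_eq_map_iff.mpr ?_
      intro i hi
      have hilt : (i : Int) < b := by
        have := List.mem_range.mp hi
        omega
      simp only [Function.comp, pvAltDigits, List.reverse_cons, List.reverse_nil,
        List.nil_append]
      rw [PySem.Int.mod_eq_emod_of_pos hb, Int.emod_eq_of_lt (by omega) hilt]
      rw [add_comm]
  | succ k ih =>
      conv_rhs => rw [pow_succ, pv_range_mul_flatMap, List.map_flatMap]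
      rw [Function.iterate_succ_apply', ih]
      show pvStep b _ = _
      rw [pvStep, List.flatMap_map, hcolors]
      rw [List.flatMap_def, List.flatMap_def]
      refine congrArg List.flatten (List.map_eq_map_iff.mpr ?_)
      intro q hq
      simp only [Function.comp_def, List.map_map]
      refine List.map_eq_map_iff.mpr ?_
      intro r hr
      have hrlt : (r : Int) < b := by
        have := List.mem_range.mp hr
        omega
      have hx : ((q * b.toNat + r : Nat) : Int) = (r : Int) + (q : Int) * b := by
        push_cast [hcast]
        ring
      have hmod : PySem.Int.mod ((q * b.toNat + r : Nat) : Int) b = (r : Int) := by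
        rw [hx, PySem.Int.mod_eq_emod_of_pos hb, Int.add_mul_emod_self_right,
          Int.emod_eq_of_lt (by omega) hrlt]
      have hdiv : PySem.Int.floordiv ((q * b.toNat + r : Nat) : Int) b = (q : Int) := by
        rw [hx, PySem.Int.floordiv_eq_ediv_of_pos hb,
          Int.add_mul_ediv_right _ _ (by omega : b ≠ 0),
          Int.ediv_eq_zero_of_lt (by omega) hrlt, zero_add]
      show (pvAltDigits b (k + 1) (q : Int)).reverse ++ [PySem.Int.toStr (1 + (r : Int))]
            = (pvAltDigits b (k + 1 + 1) ((q * b.toNat + r : Nat) : Int)).reverse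
      rw [show pvAltDigits b (k + 1 + 1) ((q * b.toNat + r : Nat) : Int)
            = PySem.Int.toStr (PySem.Int.mod ((q * b.toNat + r : Nat) : Int) b + 1)
              :: pvAltDigits b (k + 1) (PySem.Int.floordiv ((q * b.toNat + r : Nat) : Int) b)
          from rfl,
        hmod, hdiv, List.reverse_cons, add_comm (1 : Int) (r : Int)]

-- colours[j] for 0 ≤ j < b is str(j+1)
lemma pv_colours_get (b : Int) (j : Int) (h0 : 0 ≤ j) (hj : j < b) :
    PySem.List.pyGetD ((PySem.List.pyRange 1 (b + 1) 1).map PySem.Int.toStr) j ""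
      = PySem.Int.toStr (j + 1) := by
  have hk : j = ((j.toNat : Nat) : Int) := (Int.toNat_of_nonneg h0).symm
  rw [hk, PySem.List.pyGetD_map_pyRange_one PySem.Int.toStr 1 (b + 1) j.toNat ""
    (by omega)]
  congr 1
  omega

-- (x // b) // b^p = x // b^(p+1) for b > 0 (Python floordiv = ediv there)
lemma pv_floordiv_floordiv (b : Int) (hb : 0 < b) (x : Int) (p : Nat) :
    PySem.Int.floordiv (PySem.Int.floordiv x b) (b ^ p)
      = PySem.Int.floordiv x (b ^ (p + 1)) := by
  have hbp : (0 : Int) < b ^ p := pow_pos hb p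
  rw [PySem.Int.floordiv_eq_ediv_of_pos hb, PySem.Int.floordiv_eq_ediv_of_pos hbp,
    PySem.Int.floordiv_eq_ediv_of_pos (pow_pos hb (p + 1)), Int.ediv_ediv_of_nonneg hb.le,
    pow_succ']

-- low-to-high digits in closed form
lemma pvAltDigits_eq (b : Int) (hb : 0 < b) (m : Nat) (x : Int) :
    pvAltDigits b m x
      = (List.range m).map
          (fun p => PySem.Int.toStr (PySem.Int.mod (PySem.Int.floordiv x (b ^ p)) b + 1)) := by
  induction m generalizing x with
  | zero => rfl
  | succ m ih =>
      rw [List.range_succ_eq_map, List.map_cons, List.map_map]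
      show PySem.Int.toStr (PySem.Int.mod x b + 1) :: pvAltDigits b m (PySem.Int.floordiv x b)
          = _ :: _
      congr 1
      · rw [pow_zero, PySem.Int.floordiv_eq_ediv_of_pos one_pos, Int.ediv_one]
      · rw [ih]
        refine List.map_eq_map_iff.mpr ?_
        intro p _
        simp only [Function.comp]
        rw [pv_floordiv_floordiv b hb x p]

-- reversing List.range
lemma pv_range_reverse (m : Nat) :
    (List.range m).reverse = (List.range m).map (fun k => m - 1 - k) := by
  apply List.ext_getElem
  · simp
  · intro i h1 h2
    simp only [List.length_reverse, List.length_range, List.length_map] at h1 h2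
    simp only [List.getElem_reverse, List.getElem_map, List.getElem_range, List.length_range]

-- B's inner row fold equals the reversed digit list
lemma pv_row_eq (b : Int) (hb : 0 < b) (n : Int) (hn : 0 ≤ n) (i : Int) :
    (PySem.List.pyRange (n - 1) (-1) (-1)).foldl
        (fun row place =>
          row ++ [PySem.List.pyGetD ((PySem.List.pyRange 1 (b + 1) 1).map PySem.Int.toStr)
            (PySem.Int.mod (PySem.Int.floordiv i (b ^ place.toNat)) b) ""]) []
      = (pvAltDigits b n.toNat i).reverse := by
  rw [PySem.List.foldl_append_singleton_eq_map, List.nil_append,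
    PySem.List.pyRange_neg_one, pvAltDigits_eq b hb, ← List.map_reverse,
    pv_range_reverse, List.map_map, List.map_map]
  have hlen : (n - 1 - (-1)).toNat = n.toNat := by omega
  rw [hlen]
  refine List.map_eq_map_iff.mpr ?_
  intro k hk
  have hkn : k < n.toNat := List.mem_range.mp hk
  simp only [Function.comp]
  have hplace : (n - 1 - (k : Int)).toNat = n.toNat - 1 - k := by omega
  rw [hplace]
  have hmodlt : PySem.Int.mod (PySem.Int.floordiv i (b ^ (n.toNat - 1 - k))) b < b := by
    rw [PySem.Int.mod_eq_emod_of_pos hb]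
    exact Int.emod_lt_of_pos _ hb
  have hmod0 : 0 ≤ PySem.Int.mod (PySem.Int.floordiv i (b ^ (n.toNat - 1 - k))) b := by
    rw [PySem.Int.mod_eq_emod_of_pos hb]
    exact Int.emod_nonneg _ (by omega)
  rw [pv_colours_get b _ hmod0 hmodlt]

-- B as a map over List.range, for b > 0
lemma pv_B_eq_map (nc ns : Int) (hb : 0 < nc) (hn : 0 ≤ ns) :
    createAnswerList_alt nc ns
      = (List.range (nc.toNat ^ ns.toNat)).map
          (fun i : Nat => (pvAltDigits nc ns.toNat (i : Int)).reverse) := by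
  have hcast : ((nc.toNat : Int)) = nc := Int.toNat_of_nonneg hb.le
  unfold createAnswerList_alt
  simp only [List.length_map, PySem.List.length_pyRange_one, add_sub_cancel_right,
    PySem.List.foldl_append_singleton_eq_map, List.nil_append, hcast]
  have htot : nc ^ ns.toNat = ((nc.toNat ^ ns.toNat : Nat) : Int) := by
    rw [Nat.cast_pow, hcast]
  rw [htot, PySem.List.pyRange_zero_natCast, List.map_map]
  refine List.map_eq_map_iff.mpr ?_
  intro i _
  simp only [Function.comp]
  rw [← pv_row_eq nc hb ns hn (i : Int), PySem.List.foldl_append_singleton_eq_map,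
    List.nil_append]

-- B = [[]] when noSlots = 0
lemma pv_B_zero (nc : Int) : createAnswerList_alt nc 0 = [[]] := by
  unfold createAnswerList_alt
  have h01 : PySem.List.pyRange 0 1 1 = [0] := by
    have h := PySem.List.pyRange_one_singleton (a := (0 : Int))
    simpa using h
  have hneg : PySem.List.pyRange ((0 : Int) - 1) (-1) (-1) = [] :=
    PySem.List.pyRange_neg_one_eq_nil (by norm_num)
  simp only [Int.toNat_zero, pow_zero, h01, hneg, List.foldl_cons, List.foldl_nil,
    List.nil_append]

-- B = [] when noColours ≤ 0 and noSlots ≥ 1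
lemma pv_B_neg (nc ns : Int) (hb : nc ≤ 0) (hn : 1 ≤ ns) : createAnswerList_alt nc ns = [] := by
  unfold createAnswerList_alt
  rw [PySem.List.pyRange_one_eq_nil (by omega : nc + 1 ≤ 1)]
  simp only [List.map_nil, List.length_nil, Nat.cast_zero]
  rw [zero_pow (by omega : ns.toNat ≠ 0), PySem.List.pyRange_one_eq_nil le_rfl]
  rfl

-- ===== VERDICT (by name: the statement is the Claim_ definition above) =====
theorem createAnswerList_spec : Claim_unchanged_createAnswerList := by
  intro nc ns _ hpre hd
  unfold Pre_createAnswerList at hpre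
  have hns : 1 ≤ ns := by
    unfold D_createAnswerList at hd
    omega
  by_cases hb : 0 < nc
  · rw [pv_A_eq_iterate, pv_key nc hb, pv_B_eq_map nc ns hb hpre]
    have hk : (ns - 1).toNat + 1 = ns.toNat := by omega
    rw [hk]
  · -- noColours ≤ 0: both sides are the empty list
    rw [pv_A_eq_iterate]
    have hcol : PySem.List.pyRange 1 (nc + 1) 1 = [] :=
      PySem.List.pyRange_one_eq_nil (by omega)
    have hstep : pvStep nc [] = [] := by simp [pvStep]
    rw [hcol, List.map_nil, Function.iterate_fixed hstep, pv_B_neg nc ns (by omega) (by omega)]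

theorem createAnswerList_changed : Claim_changed_createAnswerList := by
  unfold Claim_changed_createAnswerList; decide

theorem createAnswerList_tight : Claim_exact_createAnswerList := by
  intro nc ns _ _ hd
  unfold D_createAnswerList at hd
  subst hd
  rw [pv_B_zero, pv_A_eq_iterate]
  simp only [show ((0 : Int) - 1).toNat = 0 from rfl, Function.iterate_zero, id]
  by_cases hb : 0 < nc
  · rw [PySem.List.pyRange_one_cons (by omega), List.map_cons]
    intro h
    have := List.head_eq_of_cons_eq h
    simp at this
  · rw [PySem.List.pyRange_one_eq_nil (by omega), List.map_nil]
    intro h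
    exact absurd h (by simp)
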